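-- pv_equiv track=rewrite | github.com/rtorresr1402/DesenioAlgoritmos | policiasLadrones.py | capturar_ladrones
-- ===== SOURCE A (Python) =====
-- def capturar_ladrones(arreglo, k):
--     i_policias = [i for i, val in enumerate(arreglo) if val == 'p']
--     i_ladrones = [i for i, val in enumerate(arreglo) if val == 'l']
--
--     capturas = 0
--     i_p = 0
--     i_l = 0
--
--     while i_p < len(i_policias) and i_l < len(i_ladrones):
--         # Si la distancia entre policía y ladrón es menor o igual que k
--         if abs(i_ladrones[i_l] - i_policias[i_p]) <= k:
--             capturas += 1  # Realiza una captura
--             i_p += 1  # Avanza al siguiente policía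
--             i_l += 1  # Avanza al siguiente ladrón
--         elif i_ladrones[i_l] < i_policias[i_p]:
--             i_l += 1  # Avanza al siguiente ladrón
--         else:
--             i_p += 1  # Avanza al siguiente policía
--
--     return capturas
-- ===== SOURCE B (Python) =====
-- def capturar_ladrones(arreglo, k):
--     # Single fused pass: queues of still-unmatched police/thief positions.
--     policias = []
--     ladrones = []
--     capturas = 0
--     for i, v in enumerate(arreglo):
--         if v == 'p':
--             while ladrones and ladrones[0] < i - k:
--                 ladrones.pop(0)
--             if ladrones:
--                 ladrones.pop(0)
--                 capturas += 1
--             else: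
--                 policias.append(i)
--         elif v == 'l':
--             while policias and policias[0] < i - k:
--                 policias.pop(0)
--             if policias:
--                 policias.pop(0)
--                 capturas += 1
--             else:
--                 ladrones.append(i)
--     return capturas
-- ===== Notes on version B (the rewrite author's own statement) =====
-- stated objective: faster
-- what changed: Replaces A's two precomputed index lists scanned by a two-pointer while loop with a single fused pass over the array that maintains queues of still-unmatched police/thief positions, matching each new element against the opposite queue after discarding out-of-range fronts.
import Mathlib
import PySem

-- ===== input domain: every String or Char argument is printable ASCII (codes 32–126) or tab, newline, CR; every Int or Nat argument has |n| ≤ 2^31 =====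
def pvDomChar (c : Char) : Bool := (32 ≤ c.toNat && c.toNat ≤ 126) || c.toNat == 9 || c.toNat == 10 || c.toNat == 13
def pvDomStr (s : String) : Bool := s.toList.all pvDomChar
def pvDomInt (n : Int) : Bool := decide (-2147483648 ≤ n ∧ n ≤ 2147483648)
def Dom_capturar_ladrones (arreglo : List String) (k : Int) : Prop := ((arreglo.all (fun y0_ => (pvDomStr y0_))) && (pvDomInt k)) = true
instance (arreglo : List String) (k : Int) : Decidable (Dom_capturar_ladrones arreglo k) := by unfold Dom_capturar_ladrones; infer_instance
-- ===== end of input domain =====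

-- B replaces A's two precomputed index lists plus two-pointer scan by ONE pass over the
-- array maintaining queues of still-unmatched police/thief positions (objective: faster, constant-factor, measured).

-- ===== PORT A =====
-- [i for i, val in enumerate(arreglo) if val == target], index carried explicitly
def idxsOf (target : String) (i : Int) : List String → List Int
  | [] => []
  | v :: rest => if v = target then i :: idxsOf target (i + 1) rest else idxsOf target (i + 1) rest

-- the while loop of A, indexing into the two lists
def capLoop (k : Int) (P L : List Int) (ip il : Nat) (c : Int) : Int :=
  if h : ip < P.length ∧ il < L.length then
    if |L[il]'h.2 - P[ip]'h.1| ≤ k then capLoop k P L (ip + 1) (il + 1) (c + 1)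
    else if L[il]'h.2 < P[ip]'h.1 then capLoop k P L ip (il + 1) c
    else capLoop k P L (ip + 1) il c
  else c
termination_by (P.length - ip) + (L.length - il)
decreasing_by all_goals omega

def capturar_ladrones (arreglo : List String) (k : Int) : Int :=
  let i_policias := idxsOf "p" 0 arreglo
  let i_ladrones := idxsOf "l" 0 arreglo
  capLoop k i_policias i_ladrones 0 0 0

-- ===== PORT B =====
-- while q and q[0] < b: q.pop(0)
def dropStale (b : Int) : List Int → List Int
  | [] => []
  | x :: xs => if x < b then dropStale b xs else x :: xs

-- the single for-loop of B: i is the current index, pq/lq the unmatched queues, c the count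
def altGo (k i : Int) (pq lq : List Int) (c : Int) : List String → Int
  | [] => c
  | v :: rest =>
    if v = "p" then
      match dropStale (i - k) lq with
      | _ :: ls => altGo k (i + 1) pq ls (c + 1) rest
      | [] => altGo k (i + 1) (pq ++ [i]) [] c rest
    else if v = "l" then
      match dropStale (i - k) pq with
      | _ :: ps => altGo k (i + 1) ps lq (c + 1) rest
      | [] => altGo k (i + 1) [] (lq ++ [i]) c rest
    else altGo k (i + 1) pq lq c rest

def capturar_ladrones_alt (arreglo : List String) (k : Int) : Int :=
  altGo k 0 [] [] 0 arreglo

-- ===== PRECONDITION & SPEC =====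
def Spec_capturar_ladrones (arreglo : List String) (k : Int) (out : Int) : Prop := out = capturar_ladrones_alt arreglo k
instance (arreglo : List String) (k : Int) (out : Int) : Decidable (Spec_capturar_ladrones arreglo k out) := by unfold Spec_capturar_ladrones; infer_instance

-- ===== CLAIM (what is proved, stated in full; the proofs are below) =====
def Claim_equal_capturar_ladrones : Prop := ∀ (arreglo : List String) (k : Int), Dom_capturar_ladrones arreglo k → Spec_capturar_ladrones arreglo k (capturar_ladrones arreglo k)

-- ===== LEMMAS AND PROOFS =====

-- common functional spec: two-pointer greedy as recursion on the two position lists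
def pvF (k : Int) : List Int → List Int → Int
  | [], _ => 0
  | _ :: _, [] => 0
  | p :: ps, l :: ls =>
    if |l - p| ≤ k then 1 + pvF k ps ls
    else if l < p then pvF k (p :: ps) ls
    else pvF k ps (l :: ls)
termination_by a b => a.length + b.length

lemma pvF_nil_right (k : Int) (a : List Int) : pvF k a [] = 0 := by
  cases a <;> simp [pvF]

lemma capLoop_eq (k : Int) (P L : List Int) (ip il : Nat) (c : Int) :
    capLoop k P L ip il c = c + pvF k (P.drop ip) (L.drop il) := by
  induction ip, il, c using capLoop.induct (k := k) (P := P) (L := L) with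
  | case1 ip il c h h1 ih =>
      rw [capLoop, dif_pos h, if_pos h1, ih,
        List.drop_eq_getElem_cons h.1, List.drop_eq_getElem_cons h.2, pvF, if_pos h1]
      ring
  | case2 ip il c h h1 h2 ih =>
      rw [capLoop, dif_pos h, if_neg h1, if_pos h2, ih,
        List.drop_eq_getElem_cons h.1, List.drop_eq_getElem_cons h.2, pvF, if_neg h1, if_pos h2]
  | case3 ip il c h h1 h2 ih =>
      rw [capLoop, dif_pos h, if_neg h1, if_neg h2, ih,
        List.drop_eq_getElem_cons h.1, List.drop_eq_getElem_cons h.2, pvF, if_neg h1, if_neg h2]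
  | case4 ip il c h =>
      rw [capLoop, dif_neg h]
      rcases Nat.lt_or_ge ip P.length with hp | hp
      · have : il ≥ L.length := by omega
        rw [List.drop_eq_nil_of_le this, pvF_nil_right]; ring
      · rw [List.drop_eq_nil_of_le hp]
        simp [pvF]

lemma mem_dropStale {b : Int} {q : List Int} {x : Int} (h : x ∈ dropStale b q) : x ∈ q := by
  induction q with
  | nil => simp [dropStale] at h
  | cons y ys ih =>
      by_cases hy : y < b
      · simp [dropStale, hy] at h
        exact List.mem_cons_of_mem _ (ih h)
      · simpa [dropStale, hy] using h

-- key step: matching the new police at position i against the thief queue, in pvF terms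
lemma pvF_police_step (k i : Int) (fp fl : List Int) :
    ∀ lq : List Int, (∀ x ∈ lq, x < i) →
    pvF k (i :: fp) (lq ++ fl) =
      (match dropStale (i - k) lq with
       | [] => pvF k (i :: fp) fl
       | _ :: ls => 1 + pvF k fp (ls ++ fl)) := by
  intro lq
  induction lq with
  | nil => intro _; simp [dropStale]
  | cons l ls ih =>
      intro hlt
      have hl : l < i := hlt l (List.mem_cons_self ..)
      by_cases hst : l < i - k
      · have habs : ¬ |l - i| ≤ k := by rw [abs_sub_comm, abs_of_nonneg (by omega)]; omega
        simp only [List.cons_append, pvF, if_neg habs, if_pos hl, dropStale, if_pos hst]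
        exact ih (fun x hx => hlt x (List.mem_cons_of_mem _ hx))
      · have habs : |l - i| ≤ k := by rw [abs_sub_comm, abs_of_nonneg (by omega)]; omega
        simp [pvF, habs, dropStale, hst]

-- key step: matching the new thief at position i against the police queue, in pvF terms
lemma pvF_thief_step (k i : Int) (fp fl : List Int) :
    ∀ pq : List Int, (∀ x ∈ pq, x < i) →
    pvF k (pq ++ fp) (i :: fl) =
      (match dropStale (i - k) pq with
       | [] => pvF k fp (i :: fl)
       | _ :: ps => 1 + pvF k (ps ++ fp) fl) := by
  intro pq
  induction pq with
  | nil => intro _; simp [dropStale]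
  | cons p ps ih =>
      intro hlt
      have hp : p < i := hlt p (List.mem_cons_self ..)
      by_cases hst : p < i - k
      · have habs : ¬ |i - p| ≤ k := by rw [abs_of_nonneg (by omega)]; omega
        simp only [List.cons_append, pvF, if_neg habs, if_neg (by omega : ¬ i < p), dropStale,
          if_pos hst]
        exact ih (fun x hx => hlt x (List.mem_cons_of_mem _ hx))
      · have habs : |i - p| ≤ k := by rw [abs_of_nonneg (by omega)]; omega
        simp [pvF, habs, dropStale, hst]

lemma altGo_eq (k : Int) :
    ∀ (rest : List String) (i : Int) (pq lq : List Int) (c : Int),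
      (∀ x ∈ pq, x < i) → (∀ x ∈ lq, x < i) → (pq = [] ∨ lq = []) →
      altGo k i pq lq c rest =
        c + pvF k (pq ++ idxsOf "p" i rest) (lq ++ idxsOf "l" i rest) := by
  intro rest
  induction rest with
  | nil =>
      intro i pq lq c _ _ hdisj
      rcases hdisj with h | h <;> subst h <;> simp [altGo, idxsOf, pvF, pvF_nil_right]
  | cons v rest ih =>
      intro i pq lq c hpq hlq hdisj
      have hsucc : ∀ (q : List Int), (∀ x ∈ q, x < i) → ∀ x ∈ q, x < i + 1 :=
        fun q h x hx => by have := h x hx; omega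
      by_cases hv : v = "p"
      · subst hv
        simp only [altGo, idxsOf, if_neg (by decide : ¬ ("p" : String) = "l"), if_true]
        rcases hdisj with hpqe | hlqe
        · subst hpqe
          simp only [List.nil_append]
          rw [pvF_police_step k i _ _ lq hlq]
          cases hds : dropStale (i - k) lq with
          | nil =>
              dsimp only
              rw [ih (i + 1) [i] [] c (by intro x hx; simp at hx; omega) (by simp) (Or.inr rfl)]
              simp
          | cons l ls =>
              dsimp only
              rw [ih (i + 1) [] ls (c + 1) (by simp)
                (fun x hx => by
                  have : x ∈ lq := mem_dropStale (hds ▸ List.mem_cons_of_mem l hx)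
                  have := hlq x this; omega) (Or.inl rfl)]
              simp; ring
        · subst hlqe
          simp only [dropStale]
          rw [ih (i + 1) (pq ++ [i]) [] c
            (by intro x hx; rcases List.mem_append.1 hx with h | h
                · have := hpq x h; omega
                · simp at h; omega) (by simp) (Or.inr rfl)]
          simp
      · by_cases hv' : v = "l"
        · subst hv'
          simp only [altGo, idxsOf, if_neg hv, if_true]
          rcases hdisj with hpqe | hlqe
          · subst hpqe
            simp only [dropStale]
            rw [ih (i + 1) [] (lq ++ [i]) c (by simp)
              (by intro x hx; rcases List.mem_append.1 hx with h | h
                  · have := hlq x h; omega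
                  · simp at h; omega) (Or.inl rfl)]
            simp
          · subst hlqe
            simp only [List.nil_append]
            rw [pvF_thief_step k i _ _ pq hpq]
            cases hds : dropStale (i - k) pq with
            | nil =>
                dsimp only
                rw [ih (i + 1) [] [i] c (by simp)
                  (by intro x hx; simp at hx; omega) (Or.inl rfl)]
                simp
            | cons p ps =>
                dsimp only
                rw [ih (i + 1) ps [] (c + 1)
                  (fun x hx => by
                    have : x ∈ pq := mem_dropStale (hds ▸ List.mem_cons_of_mem p hx)
                    have := hpq x this; omega) (by simp) (Or.inr rfl)]
                simp; ring
        · simp only [altGo, idxsOf, if_neg hv, if_neg hv']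
          exact ih (i + 1) pq lq c (hsucc pq hpq) (hsucc lq hlq) hdisj

-- ===== VERDICT (by name: the statement is the Claim_ definition above) =====
theorem capturar_ladrones_spec : Claim_equal_capturar_ladrones := by
  intro arreglo k _
  show capturar_ladrones arreglo k = capturar_ladrones_alt arreglo k
  rw [capturar_ladrones, capturar_ladrones_alt, capLoop_eq,
    altGo_eq k arreglo 0 [] [] 0 (by simp) (by simp) (Or.inl rfl)]
  simp
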